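-- pv_equiv track=rewrite | github.com/andrewasg11/riscv-simulator | addition.py | _build_float_bitvec
-- ===== SOURCE A (Python) =====
-- def _build_float_bitvec(sign, exponent, mantissa):
--     """
--     Build IEEE 754 bit vector from components.
--     Args:
--         sign: 0 or 1
--         exponent: 8-bit unsigned integer
--         mantissa: 23-bit unsigned integer
--     """
--     bitvec = [0] * 32
--
--     # Sign bit
--     bitvec[31] = sign
--
--     # Exponent (8 bits)
--     for i in range(8):
--         bitvec[23 + i] = (exponent >> i) & 1
--
--     # Mantissa (23 bits)
--     for i in range(23):
--         bitvec[i] = (mantissa >> i) & 1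
--
--     return bitvec
-- ===== SOURCE B (Python) =====
-- def _build_float_bitvec(sign, exponent, mantissa):
--     # Pack both fields into one integer, then extract bits 0..30 uniformly;
--     # the sign is stored raw in slot 31, exactly as in the original.
--     value = ((exponent & 0xFF) << 23) + (mantissa & 0x7FFFFF)
--     bitvec = [(value >> i) & 1 for i in range(31)]
--     bitvec.append(sign)
--     return bitvec
-- ===== Notes on version B (the rewrite author's own statement) =====
-- stated objective: simpler
-- what changed: Replaces the three field-specific placements into a preallocated 32-slot array (sign assignment plus two separate bit-extraction loops) by packing exponent and mantissa into one integer and extracting bits 0..30 in a single uniform comprehension, appending the raw sign last.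
import Mathlib
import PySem

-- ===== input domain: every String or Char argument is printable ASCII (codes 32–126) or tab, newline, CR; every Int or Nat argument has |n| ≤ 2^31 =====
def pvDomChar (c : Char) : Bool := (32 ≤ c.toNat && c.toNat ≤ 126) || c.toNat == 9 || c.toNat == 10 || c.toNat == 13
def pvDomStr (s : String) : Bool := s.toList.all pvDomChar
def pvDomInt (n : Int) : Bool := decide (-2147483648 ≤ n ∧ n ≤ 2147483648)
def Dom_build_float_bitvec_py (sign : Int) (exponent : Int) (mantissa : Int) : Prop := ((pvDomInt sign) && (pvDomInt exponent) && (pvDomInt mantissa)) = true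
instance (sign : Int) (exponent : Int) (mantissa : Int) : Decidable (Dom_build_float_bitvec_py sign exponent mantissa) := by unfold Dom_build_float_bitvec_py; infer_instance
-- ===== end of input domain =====

-- B packs exponent and mantissa into one integer and extracts bits 0..30 in a single
-- uniform pass (appending the raw sign), instead of A's three field-specific placements
-- into a preallocated 32-slot vector; objective: simpler.


-- ===== PORT A =====
-- bitvec = [0]*32; bitvec[31] = sign; then two bit-placement loops.  Shifts are by the
-- nonnegative pyRange element, so `.toNat` on it is exact; `&` is PySem.Int.band.
def build_float_bitvec_py (sign : Int) (exponent : Int) (mantissa : Int) : List Int :=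
  let bitvec := List.replicate 32 (0 : Int)
  let bitvec := bitvec.set 31 sign
  let bitvec := (PySem.List.pyRange 0 8 1).foldl
    (fun bv i => bv.set (23 + i).toNat (PySem.Int.band (exponent >>> i.toNat) 1)) bitvec
  let bitvec := (PySem.List.pyRange 0 23 1).foldl
    (fun bv i => bv.set i.toNat (PySem.Int.band (mantissa >>> i.toNat) 1)) bitvec
  bitvec

-- ===== PORT B =====
-- value = ((exponent & 0xFF) << 23) + (mantissa & 0x7FFFFF); one uniform extraction
-- pass over range(31); the raw sign is appended last.
def build_float_bitvec_py_alt (sign : Int) (exponent : Int) (mantissa : Int) : List Int :=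
  let value := ((PySem.Int.band exponent 255) <<< (23 : Nat)) + PySem.Int.band mantissa 8388607
  let bitvec := (PySem.List.pyRange 0 31 1).map (fun i => PySem.Int.band (value >>> i.toNat) 1)
  bitvec ++ [sign]

-- ===== PRECONDITION & SPEC =====
def Spec_build_float_bitvec_py (sign : Int) (exponent : Int) (mantissa : Int) (out : List Int) : Prop := out = build_float_bitvec_py_alt sign exponent mantissa
instance (sign : Int) (exponent : Int) (mantissa : Int) (out : List Int) : Decidable (Spec_build_float_bitvec_py sign exponent mantissa out) := by unfold Spec_build_float_bitvec_py; infer_instance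

-- ===== CLAIM (what is proved, stated in full; the proofs are below) =====
def Claim_equal_build_float_bitvec_py : Prop := ∀ (sign : Int) (exponent : Int) (mantissa : Int), Dom_build_float_bitvec_py sign exponent mantissa → Spec_build_float_bitvec_py sign exponent mantissa (build_float_bitvec_py sign exponent mantissa)

-- ===== LEMMAS AND PROOFS =====

-- Python's `x & 1` is `x % 2` (Python mod = emod for a positive divisor).
theorem pv_band_one (x : Int) : PySem.Int.band x 1 = x % 2 := by
  rw [PySem.Int.band_one, PySem.Int.mod_eq_emod_of_pos (by norm_num)]

-- Python's `x & (2^k - 1)` is `x % 2^k`, also for negative x (two's complement).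
theorem pv_band_mask (x : Int) (k : Nat) :
    PySem.Int.band x (2 ^ k - 1) = x % 2 ^ k := by
  have hp : ((2:Int) ^ k) = ((2 ^ k : Nat) : Int) := by push_cast; ring
  have hpos : (0:Int) < 2 ^ k := by positivity
  have hk : (0:Int) ≤ 2 ^ k - 1 := by omega
  have h2 : ((2:Int) ^ k - 1).toNat = 2 ^ k - 1 := by omega
  rw [PySem.Int.band.eq_1]
  by_cases hx : 0 ≤ x
  · simp only [if_pos hx, if_pos hk]
    obtain ⟨n, rfl⟩ := Int.eq_ofNat_of_zero_le hx
    rw [show ((n:Int)).toNat = n from rfl, h2, Nat.and_two_pow_sub_one_eq_mod, hp,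
      ← Int.natCast_mod]
  · simp only [if_neg hx, if_pos hk]
    set n := (-x - 1).toNat with hn
    have hxn : x = -(n : Int) - 1 := by omega
    rw [h2, Nat.and_comm, Nat.and_two_pow_sub_one_eq_mod]
    set q := n / 2 ^ k with hq'
    set r := n % 2 ^ k with hr'
    have hlt : r < 2 ^ k := Nat.mod_lt _ (by positivity)
    have hnd : 2 ^ k * q + r = n := Nat.div_add_mod n (2 ^ k)
    have hndi : ((2:Int) ^ k) * (q:Int) + (r:Int) = (n:Int) := by exact_mod_cast hnd
    have hx2 : x = ((2:Int) ^ k - 1 - (r:Int)) + (2 ^ k) * (-(q:Int) - 1) := by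
      rw [hxn, ← hndi]; ring
    rw [hx2, Int.add_mul_emod_self_left, Int.emod_eq_of_lt (by omega) (by omega)]
    have hrle : r ≤ 2 ^ k - 1 := by omega
    have hlt' : ((r:Int)) < 2 ^ k := by exact_mod_cast hlt
    push_cast [Nat.cast_sub hrle]
    omega

theorem pv_band_255 (x : Int) : PySem.Int.band x 255 = x % 256 := by
  have h := pv_band_mask x 8; norm_num at h; exact h

theorem pv_band_8388607 (x : Int) : PySem.Int.band x 8388607 = x % 8388608 := by
  have h := pv_band_mask x 23; norm_num at h; exact h

-- Python's `x >> n` (n ≥ 0) is floor division by 2^n; stated for both shift-amount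
-- encodings the ports produce (ℕ and ℕ cast to ℤ).
theorem pv_shr (x : Int) (n : Nat) : x >>> n = x / 2 ^ n := by
  rw [Int.shiftRight_eq_div_pow]; push_cast; ring_nf

theorem pv_shr_cast (x : Int) (n : Nat) : x >>> ((n : ℕ) : ℤ) = x / 2 ^ n := by
  rw [show x >>> ((n:ℕ):ℤ) = x >>> n from by cases x <;> cases n <;> rfl, pv_shr]

-- ===== VERDICT (by name: the statement is the Claim_ definition above) =====
theorem build_float_bitvec_py_spec : Claim_equal_build_float_bitvec_py := by
  intro sign exponent mantissa _
  unfold Spec_build_float_bitvec_py build_float_bitvec_py build_float_bitvec_py_alt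
  simp only [show (PySem.List.pyRange 0 8 1) = [0,1,2,3,4,5,6,7] from by decide,
    show (PySem.List.pyRange 0 23 1) = [0,1,2,3,4,5,6,7,8,9,10,11,12,13,14,15,16,17,18,19,20,21,22] from by decide,
    show (PySem.List.pyRange 0 31 1) = [0,1,2,3,4,5,6,7,8,9,10,11,12,13,14,15,16,17,18,19,20,21,22,23,24,25,26,27,28,29,30] from by decide,
    List.foldl, List.map, show Int.toNat 0 = 0 from rfl, show Int.toNat 1 = 1 from rfl, show Int.toNat 2 = 2 from rfl, show Int.toNat 3 = 3 from rfl, show Int.toNat 4 = 4 from rfl, show Int.toNat 5 = 5 from rfl, show Int.toNat 6 = 6 from rfl, show Int.toNat 7 = 7 from rfl, show Int.toNat 8 = 8 from rfl, show Int.toNat 9 = 9 from rfl, show Int.toNat 10 = 10 from rfl, show Int.toNat 11 = 11 from rfl, show Int.toNat 12 = 12 from rfl, show Int.toNat 13 = 13 from rfl, show Int.toNat 14 = 14 from rfl, show Int.toNat 15 = 15 from rfl, show Int.toNat 16 = 16 from rfl, show Int.toNat 17 = 17 from rfl, show Int.toNat 18 = 18 from rfl, show Int.toNat 19 = 19 from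 rfl, show Int.toNat 20 = 20 from rfl, show Int.toNat 21 = 21 from rfl, show Int.toNat 22 = 22 from rfl, show Int.toNat 23 = 23 from rfl, show Int.toNat 24 = 24 from rfl, show Int.toNat 25 = 25 from rfl, show Int.toNat 26 = 26 from rfl, show Int.toNat 27 = 27 from rfl, show Int.toNat 28 = 28 from rfl, show Int.toNat 29 = 29 from rfl, show Int.toNat 30 = 30 from rfl]
  simp only [pv_band_one, pv_band_255, pv_band_8388607, pv_shr, pv_shr_cast,
    Int.shiftLeft_eq]
  norm_num [List.set, List.replicate, show Int.toNat 0 = 0 from rfl, show Int.toNat 1 = 1 from rfl, show Int.toNat 2 = 2 from rfl, show Int.toNat 3 = 3 from rfl, show Int.toNat 4 = 4 from rfl, show Int.toNat 5 = 5 from rfl, show Int.toNat 6 = 6 from rfl, show Int.toNat 7 = 7 from rfl, show Int.toNat 8 = 8 from rfl, show Int.toNat 9 = 9 from rfl, show Int.toNat 10 = 10 from rfl, show Int.toNat 11 = 11 from rfl, show Int.toNat 12 = 12 from rfl, show Int.toNat 13 = 13 from rfl, show Int.toNat 14 = 14 from rfl, show Int.toNat 15 = 15 from rfl, show Int.toNat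 16 = 16 from rfl, show Int.toNat 17 = 17 from rfl, show Int.toNat 18 = 18 from rfl, show Int.toNat 19 = 19 from rfl, show Int.toNat 20 = 20 from rfl, show Int.toNat 21 = 21 from rfl, show Int.toNat 22 = 22 from rfl, show Int.toNat 23 = 23 from rfl, show Int.toNat 24 = 24 from rfl, show Int.toNat 25 = 25 from rfl, show Int.toNat 26 = 26 from rfl, show Int.toNat 27 = 27 from rfl, show Int.toNat 28 = 28 from rfl, show Int.toNat 29 = 29 from rfl, show Int.toNat 30 = 30 from rfl]
  omega
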